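-- pv_equiv track=rewrite | github.com/enderquestral/Reed-CSCI382 | Week3HW/measuringweights.py | isMeasurable
-- ===== SOURCE A (Python) =====
-- def isMeasurable(target, weights): #Weights is a list of different numbers
--     if target== sum(weights):
--         return True
--     for w in range(len(weights)):
--         if isMeasurable(target+w, weights[:w] +weights[w+1:]): #adding w to target
--             return True #recursive call within it
--         if isMeasurable(target-w, weights[:w] +weights[w+1:]): #putting w on not-target side
--             return True
--         if isMeasurable(target, weights[:w] +weights[w+1:]):#Don't touch it
--             return True
--     return False
-- ===== SOURCE B (Python) =====
-- def isMeasurable(target, weights):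
--     memo = {}
--     def solve(t, ws):
--         key = (t, ws)
--         if key in memo:
--             return memo[key]
--         if t == sum(ws):
--             res = True
--         else:
--             res = False
--             for w in range(len(ws)):
--                 rest = ws[:w] + ws[w+1:]
--                 if solve(t + w, rest) or solve(t - w, rest) or solve(t, rest):
--                     res = True
--                     break
--         memo[key] = res
--         return res
--     return solve(target, tuple(weights))
-- ===== Notes on version B (the rewrite author's own statement) =====
-- stated objective: alternative
-- what changed: Replaces A's naive 3-way recursion by top-down dynamic programming: results are memoized in a dict keyed by the state (target, remaining-weights tuple), so each distinct state is solved once instead of being recomputed along every branch of the recursion tree; on hard instances this prunes enormously, though worst-case cost remains exponential and a timing run's largest common size showed no measured speedup.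
import Mathlib
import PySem

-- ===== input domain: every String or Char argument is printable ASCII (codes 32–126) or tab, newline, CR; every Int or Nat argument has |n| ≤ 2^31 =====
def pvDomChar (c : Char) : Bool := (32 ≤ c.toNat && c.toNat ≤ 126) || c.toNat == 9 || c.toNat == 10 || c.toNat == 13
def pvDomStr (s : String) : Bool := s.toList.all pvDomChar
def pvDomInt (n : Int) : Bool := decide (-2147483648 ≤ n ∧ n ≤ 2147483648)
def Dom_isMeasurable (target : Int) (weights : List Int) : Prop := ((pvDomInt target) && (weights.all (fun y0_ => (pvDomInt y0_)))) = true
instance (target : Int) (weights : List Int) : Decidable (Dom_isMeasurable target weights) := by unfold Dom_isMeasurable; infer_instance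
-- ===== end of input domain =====

-- B replaces A's naive 3-way recursion by top-down memoization on the state
-- (target, remaining weights), solving each distinct state once (objective: alternative).

-- ws[:w] + ws[w+1:] — shared slice helper used by both ports (the same expression occurs in both Pythons)
def pvRest (ws : List Int) (w : Nat) : List Int :=
  PySem.List.slice ws none (some (w : Int)) ++ PySem.List.slice ws (some ((w : Int) + 1)) none

theorem pvRest_eq (ws : List Int) (w : Nat) : pvRest ws w = ws.take w ++ ws.drop (w + 1) := by
  have h : ((w : Int) + 1) = ((w + 1 : Nat) : Int) := by push_cast; ring
  rw [pvRest, h, PySem.List.slice_to_natCast, PySem.List.slice_from_natCast]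

theorem pvRest_length (ws : List Int) (w : Nat) (h : w < ws.length) :
    (pvRest ws w).length < ws.length := by
  rw [pvRest_eq]; simp [List.length_append]; omega

-- ===== PORT A =====
def isMeasurable (target : Int) (weights : List Int) : Bool :=
  if target = weights.sum then true
  else
    (List.range weights.length).attach.any (fun w =>
      let rest := pvRest weights w.1
      isMeasurable (target + (w.1 : Int)) rest ||
      isMeasurable (target - (w.1 : Int)) rest ||
      isMeasurable target rest)
termination_by weights.length
decreasing_by
  all_goals exact pvRest_length weights w.1 (List.mem_range.mp w.2)

-- ===== PORT B =====
-- memoized solver: returns (answer, updated memo table keyed by (target, remaining weights))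
def pvSolve (target : Int) (ws : List Int)
    (memo : PySem.Dict (Int × List Int) Bool) : Bool × PySem.Dict (Int × List Int) Bool :=
  match memo.get? (target, ws) with
  | some b => (b, memo)
  | none =>
    let res :=
      if target = ws.sum then (true, memo)
      else
        (List.range ws.length).attach.foldl
          (fun acc w =>
            if acc.1 then acc
            else
              let rest := pvRest ws w.1
              let r1 := pvSolve (target + (w.1 : Int)) rest acc.2
              if r1.1 then (true, r1.2)
              else
                let r2 := pvSolve (target - (w.1 : Int)) rest r1.2
                if r2.1 then (true, r2.2)
                else
                  let r3 := pvSolve target rest r2.2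
                  if r3.1 then (true, r3.2) else (false, r3.2))
          (false, memo)
    (res.1, res.2.insert (target, ws) res.1)
termination_by ws.length
decreasing_by
  all_goals exact pvRest_length ws w.1 (List.mem_range.mp w.2)

def isMeasurable_alt (target : Int) (weights : List Int) : Bool :=
  (pvSolve target weights PySem.Dict.empty).1

-- ===== PRECONDITION & SPEC =====
def Spec_isMeasurable (target : Int) (weights : List Int) (out : Bool) : Prop := out = isMeasurable_alt target weights
instance (target : Int) (weights : List Int) (out : Bool) : Decidable (Spec_isMeasurable target weights out) := by unfold Spec_isMeasurable; infer_instance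

-- ===== CLAIM (what is proved, stated in full; the proofs are below) =====
def Claim_equal_isMeasurable : Prop := ∀ (target : Int) (weights : List Int), Dom_isMeasurable target weights → Spec_isMeasurable target weights (isMeasurable target weights)

-- ===== LEMMAS AND PROOFS =====

-- memo-table invariant: every stored value is the corresponding result of A's recursion
def pvInv (d : PySem.Dict (Int × List Int) Bool) : Prop :=
  ∀ (p : Int × List Int) (b : Bool), d.get? p = some b → b = isMeasurable p.1 p.2

-- the loop body of pvSolve, named so the foldl can be reasoned about
def pvStep (target : Int) (ws : List Int) :
    (Bool × PySem.Dict (Int × List Int) Bool) → {x // x ∈ List.range ws.length} →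
    (Bool × PySem.Dict (Int × List Int) Bool) :=
  fun acc w =>
    if acc.1 then acc
    else
      let rest := pvRest ws w.1
      let r1 := pvSolve (target + (w.1 : Int)) rest acc.2
      if r1.1 then (true, r1.2)
      else
        let r2 := pvSolve (target - (w.1 : Int)) rest r1.2
        if r2.1 then (true, r2.2)
        else
          let r3 := pvSolve target rest r2.2
          if r3.1 then (true, r3.2) else (false, r3.2)

theorem pvSolve_eq (target : Int) (ws : List Int) (memo : PySem.Dict (Int × List Int) Bool) :
    pvSolve target ws memo =
      match memo.get? (target, ws) with
      | some b => (b, memo)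
      | none =>
        let res :=
          if target = ws.sum then (true, memo)
          else (List.range ws.length).attach.foldl (pvStep target ws) (false, memo)
        (res.1, res.2.insert (target, ws) res.1) := by
  rw [pvSolve]
  rfl

theorem pv_loop (n : Nat) (target : Int) (ws : List Int)
    (IH : ∀ (t' : Int) (ws' : List Int) (m' : PySem.Dict (Int × List Int) Bool),
      ws'.length < n → pvInv m' →
      (pvSolve t' ws' m').1 = isMeasurable t' ws' ∧ pvInv (pvSolve t' ws' m').2)
    (hn : ws.length ≤ n) :
    ∀ (l : List {x // x ∈ List.range ws.length}) (flag : Bool)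
      (memo : PySem.Dict (Int × List Int) Bool), pvInv memo →
      (l.foldl (pvStep target ws) (flag, memo)).1 =
        (flag || l.any (fun w =>
          isMeasurable (target + (w.1 : Int)) (pvRest ws w.1) ||
          isMeasurable (target - (w.1 : Int)) (pvRest ws w.1) ||
          isMeasurable target (pvRest ws w.1))) ∧
      pvInv (l.foldl (pvStep target ws) (flag, memo)).2 := by
  intro l
  induction l with
  | nil => intro flag memo hm; simp [hm]
  | cons w l ih =>
    intro flag memo hm
    have hw : w.1 < ws.length := List.mem_range.mp w.2
    have hlt : (pvRest ws w.1).length < n :=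
      lt_of_lt_of_le (pvRest_length ws w.1 hw) hn
    rcases flag with _ | _
    · -- flag = false: run the body
      have h1 := IH (target + (w.1 : Int)) (pvRest ws w.1) memo hlt hm
      simp only [List.foldl_cons]
      by_cases hb1 : (pvSolve (target + (w.1 : Int)) (pvRest ws w.1) memo).1 = true
      · have hstep : pvStep target ws (false, memo) w =
            (true, (pvSolve (target + (w.1 : Int)) (pvRest ws w.1) memo).2) := by
          simp [pvStep, hb1]
        rw [hstep]
        have := ih true _ h1.2
        refine ⟨?_, this.2⟩
        rw [this.1]
        simp [← h1.1, hb1]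
      · have h2 := IH (target - (w.1 : Int)) (pvRest ws w.1) _ hlt h1.2
        by_cases hb2 : (pvSolve (target - (w.1 : Int)) (pvRest ws w.1)
            (pvSolve (target + (w.1 : Int)) (pvRest ws w.1) memo).2).1 = true
        · have hstep : pvStep target ws (false, memo) w =
              (true, (pvSolve (target - (w.1 : Int)) (pvRest ws w.1)
                (pvSolve (target + (w.1 : Int)) (pvRest ws w.1) memo).2).2) := by
            simp [pvStep, hb1, hb2]
          rw [hstep]
          have := ih true _ h2.2
          refine ⟨?_, this.2⟩
          rw [this.1]
          simp [← h2.1, hb2]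
        · have h3 := IH target (pvRest ws w.1) _ hlt h2.2
          by_cases hb3 : (pvSolve target (pvRest ws w.1)
              (pvSolve (target - (w.1 : Int)) (pvRest ws w.1)
                (pvSolve (target + (w.1 : Int)) (pvRest ws w.1) memo).2).2).1 = true
          · have hstep : pvStep target ws (false, memo) w =
                (true, (pvSolve target (pvRest ws w.1)
                  (pvSolve (target - (w.1 : Int)) (pvRest ws w.1)
                    (pvSolve (target + (w.1 : Int)) (pvRest ws w.1) memo).2).2).2) := by
              simp [pvStep, hb1, hb2, hb3]
            rw [hstep]
            have := ih true _ h3.2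
            refine ⟨?_, this.2⟩
            rw [this.1]
            simp [← h3.1, hb3]
          · have hstep : pvStep target ws (false, memo) w =
                (false, (pvSolve target (pvRest ws w.1)
                  (pvSolve (target - (w.1 : Int)) (pvRest ws w.1)
                    (pvSolve (target + (w.1 : Int)) (pvRest ws w.1) memo).2).2).2) := by
              simp [pvStep, hb1, hb2, hb3]
            rw [hstep]
            have := ih false _ h3.2
            refine ⟨?_, this.2⟩
            rw [this.1]
            simp [List.any_cons, ← h1.1, ← h2.1, ← h3.1, hb1, hb2, hb3]
    · -- flag = true: the body is skipped
      have hstep : pvStep target ws (true, memo) w = (true, memo) := by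
        simp [pvStep]
      simp only [List.foldl_cons, hstep]
      have := ih true memo hm
      exact ⟨by rw [this.1]; simp, this.2⟩

theorem pv_main (n : Nat) : ∀ (target : Int) (ws : List Int)
    (memo : PySem.Dict (Int × List Int) Bool), ws.length < n → pvInv memo →
    (pvSolve target ws memo).1 = isMeasurable target ws ∧
    pvInv (pvSolve target ws memo).2 := by
  induction n with
  | zero => intro _ _ _ h; omega
  | succ n IH =>
    intro target ws memo hlen hm
    rw [pvSolve_eq]
    cases hg : memo.get? (target, ws) with
    | some b =>
      exact ⟨hm (target, ws) b hg, by simpa [hg] using hm⟩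
    | none =>
      simp only
      have hres :
          (if target = ws.sum then (true, memo)
           else (List.range ws.length).attach.foldl (pvStep target ws) (false, memo)).1
            = isMeasurable target ws ∧
          pvInv (if target = ws.sum then (true, memo)
           else (List.range ws.length).attach.foldl (pvStep target ws) (false, memo)).2 := by
        by_cases ht : target = ws.sum
        · rw [isMeasurable]
          simp [ht, hm]
        · have hloop := pv_loop n target ws
            (fun t' ws' m' h1 h2 => IH t' ws' m' h1 h2) (by omega)
            (List.range ws.length).attach false memo hm
          rw [isMeasurable]
          simp only [ht, if_false]
          refine ⟨?_, hloop.2⟩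
          rw [hloop.1]
          simp
      refine ⟨hres.1, ?_⟩
      intro p b hb
      rcases eq_or_ne p (target, ws) with rfl | hne
      · rw [PySem.Dict.get?_insert_self] at hb
        cases hb
        exact hres.1
      · rw [PySem.Dict.get?_insert, if_neg hne] at hb
        exact hres.2 p b hb

theorem pvInv_empty : pvInv PySem.Dict.empty := by
  intro p b hb
  simp [PySem.Dict.get?_empty] at hb

-- ===== VERDICT (by name: the statement is the Claim_ definition above) =====
theorem isMeasurable_spec : Claim_equal_isMeasurable := by
  intro target weights _
  unfold Spec_isMeasurable isMeasurable_alt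
  exact ((pv_main (weights.length + 1) target weights PySem.Dict.empty
    (by omega) pvInv_empty).1).symm
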